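-- pv_equiv track=rewrite | github.com/3bdoo11/Codezilla_Python | functions/Functons/returns the string while making vowels and the first letter of each word capital..py | capitalize_vowels_and_first_letter
-- ===== SOURCE A (Python) =====
-- def capitalize_vowels_and_first_letter(txt):
--     vowels = "aeiouAEIOU"
--     words = txt.split()
--     capitalized_words = []
--     for word in words:
--         capitalized_word = ""
--         for i, char in enumerate(word):
--             if char in vowels or i == 0:
--                 capitalized_word += char.upper()
--             else:
--                 capitalized_word += char.lower()
--         capitalized_words.append(capitalized_word)
--     return ' '.join(capitalized_words)
-- ===== SOURCE B (Python) =====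
-- _VOWEL_UP = str.maketrans('aeiou', 'AEIOU')
--
-- def capitalize_vowels_and_first_letter(txt):
--     out = []
--     for word in txt.split():
--         res = word.lower().translate(_VOWEL_UP)
--         out.append(res[0].upper() + res[1:])
--     return ' '.join(out)
-- ===== Notes on version B (the rewrite author's own statement) =====
-- stated objective: faster
-- what changed: A's per-character if/else branching loop building each word by repeated string += is replaced by a per-word pipeline: lowercase the whole word, uppercase all vowels at once via a precomputed str.maketrans translation table, then force the first character to uppercase.
import Mathlib
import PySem

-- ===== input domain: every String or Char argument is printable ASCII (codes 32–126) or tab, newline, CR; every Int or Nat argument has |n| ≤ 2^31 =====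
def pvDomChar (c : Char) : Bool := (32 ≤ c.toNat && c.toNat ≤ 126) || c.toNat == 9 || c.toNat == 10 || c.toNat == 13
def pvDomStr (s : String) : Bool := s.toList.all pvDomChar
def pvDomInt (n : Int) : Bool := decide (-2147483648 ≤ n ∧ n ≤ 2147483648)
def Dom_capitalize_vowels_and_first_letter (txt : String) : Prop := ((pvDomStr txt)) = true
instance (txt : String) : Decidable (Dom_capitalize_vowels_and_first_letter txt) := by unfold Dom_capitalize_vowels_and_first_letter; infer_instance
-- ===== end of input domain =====

-- B replaces A's per-character if/else loop by a per-word lowercase pass, a fixed vowel→uppercase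
-- translation table and a single first-character upcase (measured faster in a timing run; return value only).

-- ===== PORT A =====
def capitalize_vowels_and_first_letter (txt : String) : String :=
  let vowels := "aeiouAEIOU"
  let words := PySem.Str.split₀ txt
  let capitalized_words := words.foldl (fun acc word =>
    let capitalized_word := (PySem.List.enumerate word.toList 0).foldl
      (fun cw p =>
        if PySem.Chars.isIn [p.2] vowels.toList || p.1 == 0 then
          cw ++ [PySem.Chars.upperChar p.2]
        else
          cw ++ [PySem.Chars.lowerChar p.2]) []
    acc ++ [String.ofList capitalized_word]) []
  PySem.Str.join " " capitalized_words

-- ===== PORT B =====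
-- the translation table str.maketrans('aeiou', 'AEIOU') as a finite lookup
def pvTr (c : Char) : Char :=
  if c = 'a' then 'A' else if c = 'e' then 'E' else if c = 'i' then 'I'
  else if c = 'o' then 'O' else if c = 'u' then 'U' else c

-- res[0].upper() + res[1:]; the [] branch is unreachable (split() yields only non-empty words)
def pvCapWord (res : List Char) : List Char :=
  match res with
  | [] => []
  | c :: rest => PySem.Chars.upperChar c :: rest

def capitalize_vowels_and_first_letter_alt (txt : String) : String :=
  PySem.Str.join " " ((PySem.Str.split₀ txt).map (fun word =>
    String.ofList (pvCapWord ((PySem.Chars.lower word.toList).map pvTr))))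

-- ===== PRECONDITION & SPEC =====
def Spec_capitalize_vowels_and_first_letter (txt : String) (out : String) : Prop := out = capitalize_vowels_and_first_letter_alt txt
instance (txt : String) (out : String) : Decidable (Spec_capitalize_vowels_and_first_letter txt out) := by unfold Spec_capitalize_vowels_and_first_letter; infer_instance

-- ===== CLAIM (what is proved, stated in full; the proofs are below) =====
def Claim_equal_capitalize_vowels_and_first_letter : Prop := ∀ (txt : String), Dom_capitalize_vowels_and_first_letter txt → Spec_capitalize_vowels_and_first_letter txt (capitalize_vowels_and_first_letter txt)

-- ===== LEMMAS AND PROOFS =====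

theorem char_le_iff (a c : Char) : (a ≤ c) ↔ a.toNat ≤ c.toNat := by
  rw [Char.le_def, UInt32.le_iff_toNat_le]; rfl

theorem char_eq_iff (a b : Char) : a = b ↔ a.toNat = b.toNat := by
  exact eq_iff_eq_of_cmp_eq_cmp rfl

theorem ofNat_toNat' (n : Nat) (h : n < 55296) : (Char.ofNat n).toNat = n := by
  rw [Char.toNat_ofNat, if_pos (Or.inl h)]

-- A's `char in vowels` on a one-character string is list membership
theorem isIn_singleton (c : Char) (l : List Char) :
    PySem.Chars.isIn [c] l = l.contains c := by
  by_cases h : c ∈ l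
  · rw [(PySem.Chars.isIn_iff_infix _ _).2 ((List.singleton_infix_iff c l).2 h)]
    simp [h]
  · rw [(PySem.Chars.isIn_eq_false_iff _ _).2 (fun hin => h ((List.singleton_infix_iff c l).1 hin))]
    simp [h]

theorem upper_lower (c : Char) :
    PySem.Chars.upperChar (PySem.Chars.lowerChar c) = PySem.Chars.upperChar c := by
  unfold PySem.Chars.lowerChar PySem.Chars.upperChar PySem.Chars.isupper PySem.Chars.islower
  simp only [Bool.and_eq_true, decide_eq_true_iff, char_le_iff]
  have hA : 'A'.toNat = 65 := rfl
  have hZ : 'Z'.toNat = 90 := rfl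
  have ha : 'a'.toNat = 97 := rfl
  have hz : 'z'.toNat = 122 := rfl
  split_ifs with h1 h2 h3 h4
  · rw [hA, hZ] at h1; rw [ha, hz] at h3; omega
  · have hv : (Char.ofNat (c.toNat + 32)).toNat = c.toNat + 32 :=
      ofNat_toNat' _ (by rw [hA, hZ] at h1; omega)
    rw [hv, Nat.add_sub_cancel, Char.ofNat_toNat]
  · have hv : (Char.ofNat (c.toNat + 32)).toNat = c.toNat + 32 :=
      ofNat_toNat' _ (by rw [hA, hZ] at h1; omega)
    rw [hv, ha, hz] at h2; rw [hA, hZ] at h1; omega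
  · have hv : (Char.ofNat (c.toNat + 32)).toNat = c.toNat + 32 :=
      ofNat_toNat' _ (by rw [hA, hZ] at h1; omega)
    rw [hv, ha, hz] at h2; rw [hA, hZ] at h1; omega
  · rfl
  · rfl

theorem upper_upper (c : Char) :
    PySem.Chars.upperChar (PySem.Chars.upperChar c) = PySem.Chars.upperChar c := by
  unfold PySem.Chars.upperChar PySem.Chars.islower
  simp only [Bool.and_eq_true, decide_eq_true_iff, char_le_iff]
  have ha : 'a'.toNat = 97 := rfl
  have hz : 'z'.toNat = 122 := rfl
  split_ifs with h1 h2
  · have hv : (Char.ofNat (c.toNat - 32)).toNat = c.toNat - 32 :=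
      ofNat_toNat' _ (by rw [ha, hz] at h1; omega)
    rw [hv, ha, hz] at h2; rw [ha, hz] at h1; omega
  · rfl
  · rfl

-- pointwise: the translation table applied after lowercasing is A's vowel rule
theorem tr_lower (c : Char) :
    pvTr (PySem.Chars.lowerChar c) =
      if PySem.Chars.isIn [c] "aeiouAEIOU".toList then PySem.Chars.upperChar c
      else PySem.Chars.lowerChar c := by
  by_cases hc : c ∈ "aeiouAEIOU".toList
  · have hvl : "aeiouAEIOU".toList = ['a','e','i','o','u','A','E','I','O','U'] := rfl
    rw [hvl] at hc
    simp only [List.mem_cons, List.not_mem_nil, or_false] at hc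
    rcases hc with rfl|rfl|rfl|rfl|rfl|rfl|rfl|rfl|rfl|rfl <;> decide
  · rw [isIn_singleton]
    have hcontains : "aeiouAEIOU".toList.contains c = false := by simpa using hc
    rw [hcontains]
    simp only [Bool.false_eq_true, if_false]
    have hne : ∀ (d : Char), d ∈ "aeiouAEIOU".toList → c.toNat ≠ d.toNat :=
      fun d hd he => hc (by rw [(char_eq_iff c d).2 he]; exact hd)
    have e65 := hne 'A' (by decide)
    have e69 := hne 'E' (by decide)
    have e73 := hne 'I' (by decide)
    have e79 := hne 'O' (by decide)
    have e85 := hne 'U' (by decide)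
    have e97 := hne 'a' (by decide)
    have e101 := hne 'e' (by decide)
    have e105 := hne 'i' (by decide)
    have e111 := hne 'o' (by decide)
    have e117 := hne 'u' (by decide)
    simp only [show 'A'.toNat = 65 from rfl, show 'E'.toNat = 69 from rfl,
      show 'I'.toNat = 73 from rfl, show 'O'.toNat = 79 from rfl, show 'U'.toNat = 85 from rfl,
      show 'a'.toNat = 97 from rfl, show 'e'.toNat = 101 from rfl, show 'i'.toNat = 105 from rfl,
      show 'o'.toNat = 111 from rfl, show 'u'.toNat = 117 from rfl]
      at e65 e69 e73 e79 e85 e97 e101 e105 e111 e117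
    unfold PySem.Chars.lowerChar PySem.Chars.isupper
    by_cases hU : (decide ('A' ≤ c) && decide (c ≤ 'Z')) = true
    · rw [if_pos hU]
      simp only [Bool.and_eq_true, decide_eq_true_iff, char_le_iff,
        show 'A'.toNat = 65 from rfl, show 'Z'.toNat = 90 from rfl] at hU
      have hv : (Char.ofNat (c.toNat + 32)).toNat = c.toNat + 32 := ofNat_toNat' _ (by omega)
      unfold pvTr
      rw [if_neg (by rw [char_eq_iff, hv]; show _ ≠ 97; omega),
          if_neg (by rw [char_eq_iff, hv]; show _ ≠ 101; omega),
          if_neg (by rw [char_eq_iff, hv]; show _ ≠ 105; omega),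
          if_neg (by rw [char_eq_iff, hv]; show _ ≠ 111; omega),
          if_neg (by rw [char_eq_iff, hv]; show _ ≠ 117; omega)]
    · rw [if_neg hU]
      unfold pvTr
      rw [if_neg (by rw [char_eq_iff]; show _ ≠ 97; omega),
          if_neg (by rw [char_eq_iff]; show _ ≠ 101; omega),
          if_neg (by rw [char_eq_iff]; show _ ≠ 105; omega),
          if_neg (by rw [char_eq_iff]; show _ ≠ 111; omega),
          if_neg (by rw [char_eq_iff]; show _ ≠ 117; omega)]

theorem upper_tr_lower (c : Char) :
    PySem.Chars.upperChar (pvTr (PySem.Chars.lowerChar c)) = PySem.Chars.upperChar c := by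
  rw [tr_lower]
  by_cases h : PySem.Chars.isIn [c] "aeiouAEIOU".toList = true
  · rw [if_pos h, upper_upper]
  · rw [if_neg h, upper_lower]

-- a fold that appends one element per step builds acc ++ map
theorem foldl_append_map {α β : Type} (l : List α) (g : α → β) (acc : List β) :
    l.foldl (fun cw p => cw ++ [g p]) acc = acc ++ l.map g := by
  induction l generalizing acc with
  | nil => simp
  | cons x xs ih => simp [List.foldl, ih]

-- A's branching append-fold builds acc ++ map of the branched element
theorem foldl_if_append_map {α β : Type} (l : List α) (cond : α → Bool) (f g : α → β) (acc : List β) :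
    l.foldl (fun cw p => if cond p then cw ++ [f p] else cw ++ [g p]) acc
      = acc ++ l.map (fun p => if cond p then f p else g p) := by
  induction l generalizing acc with
  | nil => simp
  | cons x xs ih =>
    simp only [List.foldl, List.map_cons]
    by_cases h : cond x <;> simp [h, ih]

-- past the first character the index is never 0, so A's rule is tr ∘ lowerChar
theorem tail_map (cs : List Char) (s : Int) (hs : 1 ≤ s) :
    (PySem.List.enumerate cs s).map
      (fun p => if PySem.Chars.isIn [p.2] "aeiouAEIOU".toList || p.1 == 0 then
          PySem.Chars.upperChar p.2 else PySem.Chars.lowerChar p.2)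
      = cs.map (fun c => pvTr (PySem.Chars.lowerChar c)) := by
  induction cs generalizing s with
  | nil => simp [PySem.List.enumerate_nil]
  | cons c cs ih =>
    rw [PySem.List.enumerate_cons, List.map_cons, List.map_cons, ih (s+1) (by omega)]
    congr 1
    have hne : (s == (0:Int)) = false := by simp; omega
    rw [tr_lower c]
    by_cases h : PySem.Chars.isIn [c] "aeiouAEIOU".toList <;> simp [h, hne]

-- per word, A's inner loop equals B's word transform
theorem word_eq (cs : List Char) :
    (PySem.List.enumerate cs 0).foldl
      (fun cw p =>
        if PySem.Chars.isIn [p.2] "aeiouAEIOU".toList || p.1 == 0 then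
          cw ++ [PySem.Chars.upperChar p.2]
        else
          cw ++ [PySem.Chars.lowerChar p.2]) []
      = pvCapWord ((PySem.Chars.lower cs).map pvTr) := by
  rw [foldl_if_append_map]
  cases cs with
  | nil => simp [PySem.List.enumerate_nil, PySem.Chars.lower, pvCapWord]
  | cons c cs =>
    rw [PySem.List.enumerate_cons, List.map_cons]
    simp only [List.nil_append, zero_add]
    rw [tail_map cs 1 (by omega)]
    rw [show PySem.Chars.lower (c :: cs) = PySem.Chars.lowerChar c :: PySem.Chars.lower cs from rfl,
        List.map_cons]
    show _ :: _ = PySem.Chars.upperChar (pvTr (PySem.Chars.lowerChar c)) :: _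
    congr 1
    · rw [upper_tr_lower c]
      have h0 : ((0:Int) == 0) = true := rfl
      show (if (PySem.Chars.isIn [c] "aeiouAEIOU".toList || ((0:Int) == 0)) = true then
              PySem.Chars.upperChar c else PySem.Chars.lowerChar c) = _
      rw [h0, Bool.or_true, if_pos rfl]
    · show cs.map (fun c => pvTr (PySem.Chars.lowerChar c)) = (PySem.Chars.lower cs).map pvTr
      rw [PySem.Chars.lower, List.map_map]
      rfl

-- ===== VERDICT (by name: the statement is the Claim_ definition above) =====
theorem capitalize_vowels_and_first_letter_spec : Claim_equal_capitalize_vowels_and_first_letter := by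
  intro txt _
  show capitalize_vowels_and_first_letter txt = capitalize_vowels_and_first_letter_alt txt
  unfold capitalize_vowels_and_first_letter capitalize_vowels_and_first_letter_alt
  simp only []
  congr 1
  rw [foldl_append_map]
  simp only [List.nil_append]
  apply List.map_congr_left
  intro w _
  rw [word_eq]
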